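-- pv_equiv track=rewrite | github.com/tdda/tdda | rexpy/rexpy.py | to_vrles
-- ===== SOURCE A (Python) =====
-- from collections import Counter, defaultdict, namedtuple
--
-- MAX_VRLE_RANGE = 2  # Meaning that it will only produce patterns like
--
-- def signature(rle):
--     """
--     Return the sequence of characters in a run-length encoding
--     (i.e. the signature).
--
--     Also works with variable run-length encodings
--     """
--     return ''.join(r[0] for r in rle)
--
-- def to_vrles(rles):
--     """
--     Convert a list of run-length encodings to a list of variable run-length
--     encodings, one for each common signature.
--
--     For example, given inputs of:
--
--             (('C', 2),)
--             (('C', 3),)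
--         and (('C', 2), ('.', 1))
--
--     this would return
--
--             (('C', 2, 3),)
--         and (('C', 2, 2), ('.', 1, 1))
--     """
--     by_sig = defaultdict(list)
--     outs = []
--     for rle in rles:
--         by_sig[signature(rle)].append(rle)
--     for sig, rles in by_sig.items():
--         nCats = len(sig)
--         cats = list(sig)
--         mins = [min(r[i][1] for r in rles) for i in range(nCats)]
--         maxes = [max(r[i][1] for r in rles) for i in range(nCats)]
--         outs.append(tuple([(cat, m, M)
--                            for (cat, m, M) in zip(cats, mins, maxes)]))
--
--     if MAX_VRLE_RANGE is not None:
--         outs2 = [tuple(((cat, m, M) if (M - m) <= MAX_VRLE_RANGE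
--                                     else (cat, 1, None))
--                        for (cat, m, M) in pattern)
--                  for pattern in outs]
--         outs = list(set(outs2))
--         outs.sort()
--     return outs
-- ===== SOURCE B (Python) =====
-- MAX_VRLE_RANGE = 2
--
--
-- def to_vrles(rles):
--     # One streaming pass: ordered dict  signature -> (mins, maxes),
--     # folding each rle's counts into running per-position minima/maxima.
--     acc = {}
--     for rle in rles:
--         sig = ''.join(r[0] for r in rle)
--         counts = [rle[i][1] for i in range(len(sig))]
--         prev = acc.get(sig)
--         if prev is None:
--             acc[sig] = (counts, counts)
--         else:
--             mins, maxes = prev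
--             acc[sig] = ([min(m, c) for m, c in zip(mins, counts)],
--                         [max(M, c) for M, c in zip(maxes, counts)])
--     outs = [tuple(zip(sig, mins, maxes)) for sig, (mins, maxes) in acc.items()]
--     outs2 = [tuple(((cat, m, M) if (M - m) <= MAX_VRLE_RANGE
--                                 else (cat, 1, None))
--                    for (cat, m, M) in pattern)
--              for pattern in outs]
--     outs = list(set(outs2))
--     outs.sort()
--     return outs
-- ===== Notes on version B (the rewrite author's own statement) =====
-- stated objective: alternative
-- what changed: B replaces A's group-then-rescan (defaultdict of rle lists, then two per-position min()/max() scans over each group) with a single streaming pass keeping an ordered dict signature -> (running mins, running maxes), folding each rle's counts in as it arrives; the clamp/dedup/sort epilogue is unchanged.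
import Mathlib
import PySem

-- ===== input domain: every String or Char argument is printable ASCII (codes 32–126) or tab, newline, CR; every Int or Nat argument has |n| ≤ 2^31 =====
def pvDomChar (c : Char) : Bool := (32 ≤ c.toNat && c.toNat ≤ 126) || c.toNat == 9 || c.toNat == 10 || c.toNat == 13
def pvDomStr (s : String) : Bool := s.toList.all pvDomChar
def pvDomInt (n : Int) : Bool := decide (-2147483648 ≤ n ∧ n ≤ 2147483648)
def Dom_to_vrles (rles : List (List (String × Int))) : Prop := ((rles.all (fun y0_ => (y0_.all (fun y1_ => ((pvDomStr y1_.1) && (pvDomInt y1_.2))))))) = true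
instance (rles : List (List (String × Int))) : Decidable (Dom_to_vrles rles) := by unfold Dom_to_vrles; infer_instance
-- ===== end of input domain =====

-- B fuses A's group-then-rescan (dict of rle lists, then per-position min/max scans over each
-- group) into ONE streaming pass keeping running (mins, maxes) per signature (objective:
-- alternative decomposition); the clamp/dedup/sort epilogue is textually identical in both
-- Pythons and is the shared helper pvFinish.

-- ''.join(r[0] for r in rle) — the signature, kept as its character list (String equality
-- ↔ char-list equality, so using it as the dict key is exact)
def pvSig (rle : List (String × Int)) : List Char :=
  (rle.map (fun r => r.1.toList)).flatten

-- Python's sort key: tuple/lexicographic order on the ((cat, m, M), …) patterns; the None slot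
-- is read as 0, which is exact under Pre_to_vrles (no pattern containing None is ever compared)
def pvKey (pat : List (String × Int × Option Int)) : List (Lex (String × Lex (Int × Int))) :=
  pat.map (fun t => toLex (t.1, toLex (t.2.1, t.2.2.getD 0)))

-- the epilogue both Pythons share verbatim: clamp ranges > MAX_VRLE_RANGE (= 2, not None, so
-- the 'if MAX_VRLE_RANGE is not None' branch is always taken), outs = list(set(outs2)), outs.sort()
def pvFinish (outs : List (List (String × Int × Int))) : List (List (String × Int × Option Int)) :=
  let outs2 := outs.map (fun pattern => pattern.map (fun t =>
      if t.2.2 - t.2.1 ≤ 2 then (t.1, t.2.1, (some t.2.2 : Option Int))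
      else (t.1, (1 : Int), (none : Option Int))))
  PySem.List.sorted (PySem.Set.ofList outs2) pvKey false

-- ===== PORT A =====
def to_vrles (rles : List (List (String × Int))) : List (List (String × Int × Option Int)) :=
  let by_sig := rles.foldl (fun d rle => d.modify (pvSig rle) [] (fun g => g ++ [rle])) (PySem.Dict.empty)
  let outs := by_sig.items.foldl (fun outs si =>
      let sig := si.1
      let rlesG := si.2
      let nCats : Int := (sig.length : Int)
      let cats := sig
      let mins := (PySem.List.pyRange 0 nCats 1).map (fun i =>
          (PySem.List.min? (rlesG.map (fun r => (PySem.List.pyGetD r i ("", 0)).2)) (fun x => x)).getD 0)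
      let maxes := (PySem.List.pyRange 0 nCats 1).map (fun i =>
          (PySem.List.max? (rlesG.map (fun r => (PySem.List.pyGetD r i ("", 0)).2)) (fun x => x)).getD 0)
      outs ++ [(cats.zip (mins.zip maxes)).map (fun p => (String.ofList [p.1], p.2.1, p.2.2))]) []
  pvFinish outs

-- ===== PORT B =====
def to_vrles_alt (rles : List (List (String × Int))) : List (List (String × Int × Option Int)) :=
  let acc := rles.foldl (fun d rle =>
      let sig := pvSig rle
      let counts := (PySem.List.pyRange 0 ((sig.length : Int)) 1).map (fun i =>
          (PySem.List.pyGetD rle i ("", 0)).2)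
      d.insert sig (match d.get? sig with
        | none => (counts, counts)
        | some (mins, maxes) => (List.zipWith min mins counts, List.zipWith max maxes counts)))
    PySem.Dict.empty
  let outs := acc.items.map (fun si =>
      (si.1.zip (si.2.1.zip si.2.2)).map (fun p => (String.ofList [p.1], p.2.1, p.2.2)))
  pvFinish outs

-- ===== PRECONDITION & SPEC =====
-- Pre_ excludes (a) rles whose signature is longer than the rle itself (A raises IndexError
-- there), and (b) conservatively, inputs with several distinct signatures where some repeated
-- signature has a positionwise count gap > MAX_VRLE_RANGE: there a '(cat, 1, None)' pattern can
-- be compared with an int pattern in outs.sort() and Python may raise TypeError.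
def Pre_to_vrles (rles : List (List (String × Int))) : Prop :=
  (∀ rle ∈ rles, (pvSig rle).length ≤ rle.length) ∧
  ((∀ r1 ∈ rles, ∀ r2 ∈ rles, pvSig r1 = pvSig r2) ∨
   (∀ r1 ∈ rles, ∀ r2 ∈ rles, pvSig r1 = pvSig r2 →
      ∀ i, i < (pvSig r1).length → ((r1.getD i ("", 0)).2 - (r2.getD i ("", 0)).2).natAbs ≤ 2))
instance (rles : List (List (String × Int))) : Decidable (Pre_to_vrles rles) := by unfold Pre_to_vrles; infer_instance

def pvWitness_to_vrles : (List (List (String × Int))) := [[("C", 2)], [("C", 3)], [("C", 2), (".", 1)]]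

def Spec_to_vrles (rles : List (List (String × Int))) (out : List (List (String × Int × Option Int))) : Prop := out = to_vrles_alt rles
instance (rles : List (List (String × Int))) (out : List (List (String × Int × Option Int))) : Decidable (Spec_to_vrles rles out) := by unfold Spec_to_vrles; infer_instance

-- ===== CLAIM (what is proved, stated in full; the proofs are below) =====
def Claim_equal_to_vrles : Prop := ∀ (rles : List (List (String × Int))), Dom_to_vrles rles → Pre_to_vrles rles → Spec_to_vrles rles (to_vrles rles)

-- ===== LEMMAS AND PROOFS =====

-- r[i][1] and the counts list [rle[i][1] for i in range(len(sig))]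
def pvCnt (r : List (String × Int)) (i : Int) : Int := (PySem.List.pyGetD r i ("", 0)).2
def pvCnts (r : List (String × Int)) : List Int :=
  (PySem.List.pyRange 0 ((pvSig r).length : Int) 1).map (fun i => (PySem.List.pyGetD r i ("", 0)).2)

-- the group of a signature, in input order
def pvGrp (rles : List (List (String × Int))) (s : List Char) : List (List (String × Int)) :=
  rles.filter (fun r => pvSig r == s)

-- A's dict-building step and B's
def pvStepA (d : PySem.Dict (List Char) (List (List (String × Int)))) (rle : List (String × Int)) :
    PySem.Dict (List Char) (List (List (String × Int))) :=
  d.modify (pvSig rle) [] (fun g => g ++ [rle])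
def pvStepB (d : PySem.Dict (List Char) (List Int × List Int)) (rle : List (String × Int)) :
    PySem.Dict (List Char) (List Int × List Int) :=
  d.insert (pvSig rle) (match d.get? (pvSig rle) with
    | none => (pvCnts rle, pvCnts rle)
    | some (mins, maxes) => (List.zipWith min mins (pvCnts rle), List.zipWith max maxes (pvCnts rle)))

-- what B's fold holds at one key, as a fold over the key's group
def pvMergeStep (o : Option (List Int × List Int)) (r : List (String × Int)) :
    Option (List Int × List Int) :=
  some (match o with
    | none => (pvCnts r, pvCnts r)
    | some (mins, maxes) => (List.zipWith min mins (pvCnts r), List.zipWith max maxes (pvCnts r)))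
def pvMerge (o : Option (List Int × List Int)) (g : List (List (String × Int))) :
    Option (List Int × List Int) :=
  g.foldl pvMergeStep o

def pvEmb (p : Char × Int × Int) : String × Int × Int := (String.ofList [p.1], p.2.1, p.2.2)
def pvEntryA (si : List Char × List (List (String × Int))) : List (String × Int × Int) :=
  (si.1.zip
    (((PySem.List.pyRange 0 ((si.1.length : Int)) 1).map (fun i =>
        (PySem.List.min? (si.2.map (fun r => (PySem.List.pyGetD r i ("", 0)).2)) (fun x => x)).getD 0)).zip
     ((PySem.List.pyRange 0 ((si.1.length : Int)) 1).map (fun i =>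
        (PySem.List.max? (si.2.map (fun r => (PySem.List.pyGetD r i ("", 0)).2)) (fun x => x)).getD 0)))).map pvEmb
def pvEntryB (si : List Char × (List Int × List Int)) : List (String × Int × Int) :=
  (si.1.zip (si.2.1.zip si.2.2)).map pvEmb

theorem pvA_explicit (rles : List (List (String × Int))) :
    to_vrles rles =
      pvFinish ((rles.foldl pvStepA PySem.Dict.empty).items.foldl
        (fun outs si => outs ++ [pvEntryA si]) []) := rfl

theorem pvB_explicit (rles : List (List (String × Int))) :
    to_vrles_alt rles =
      pvFinish (((rles.foldl pvStepB PySem.Dict.empty).items.map pvEntryB)) := rfl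

theorem pvCnts_length (r : List (String × Int)) : (pvCnts r).length = (pvSig r).length := by
  simp [pvCnts, PySem.List.pyRange_zero_natCast]

theorem pvCnts_getD (r : List (String × Int)) (i : Nat) (hi : i < (pvSig r).length) :
    (pvCnts r).getD i 0 = pvCnt r (i : Int) := by
  have h := PySem.List.getElem?_map_pyRange_zero
      (fun i => (PySem.List.pyGetD r i ("", 0)).2) (pvSig r).length i hi
  simp [pvCnts, pvCnt, List.getD_eq_getElem?_getD, h]

theorem pvGetA (rles : List (List (String × Int))) (d : PySem.Dict (List Char) (List (List (String × Int)))) (s : List Char) :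
    (rles.foldl pvStepA d).getD s [] = d.getD s [] ++ pvGrp rles s := by
  have hfold : rles.foldl pvStepA d =
      (rles.map (fun r => (pvSig r, r))).foldl
        (fun d p => d.modify p.1 [] (fun g => g ++ [p.2])) d := by
    rw [List.foldl_map]; rfl
  rw [hfold, PySem.Dict.getD_foldl_modify_append, pvGrp, List.filter_map]
  simp [List.map_map, Function.comp_def]

theorem pvGetB (rles : List (List (String × Int))) (d : PySem.Dict (List Char) (List Int × List Int)) (s : List Char) :
    (rles.foldl pvStepB d).get? s = pvMerge (d.get? s) (pvGrp rles s) := by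
  induction rles generalizing d with
  | nil => rfl
  | cons r t ih =>
    rw [List.foldl_cons, ih]
    by_cases h : pvSig r = s
    · have hg : pvGrp (r :: t) s = r :: pvGrp t s := by
        simp [pvGrp, h]
      rw [hg]
      have hstep : (pvStepB d r).get? s = pvMergeStep (d.get? s) r := by
        rw [pvStepB, h, PySem.Dict.get?_insert_self]; rfl
      rw [hstep]; rfl
    · have hg : pvGrp (r :: t) s = pvGrp t s := by
        simp [pvGrp, h]
      rw [hg]
      have hstep : (pvStepB d r).get? s = d.get? s := by
        rw [pvStepB, PySem.Dict.get?_insert_of_ne _ _ (fun hc => h hc.symm)]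
      rw [hstep]

theorem pvKeysA (rles : List (List (String × Int))) :
    (rles.foldl pvStepA PySem.Dict.empty).keys = PySem.Set.ofList (rles.map pvSig) := by
  have h := PySem.Dict.keys_foldl_modify_key rles pvSig []
      (fun _ rle => (fun g => g ++ [rle])) (PySem.Dict.empty)
  have h2 : rles.foldl pvStepA PySem.Dict.empty =
      List.foldl (fun d x => d.modify (pvSig x) [] ((fun _ rle => (fun g => g ++ [rle])) d x))
        PySem.Dict.empty rles := rfl
  rw [h2, h]
  rfl

theorem pvKeysB (rles : List (List (String × Int))) :
    (rles.foldl pvStepB PySem.Dict.empty).keys = PySem.Set.ofList (rles.map pvSig) := by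
  have h := PySem.Dict.keys_foldl_insert_key rles pvSig
      (fun d rle => (match d.get? (pvSig rle) with
        | none => (pvCnts rle, pvCnts rle)
        | some (mins, maxes) =>
            (List.zipWith min mins (pvCnts rle), List.zipWith max maxes (pvCnts rle))))
      (PySem.Dict.empty)
  have h2 : rles.foldl pvStepB PySem.Dict.empty =
      List.foldl (fun d x => d.insert (pvSig x)
        ((fun d rle => (match d.get? (pvSig rle) with
          | none => (pvCnts rle, pvCnts rle)
          | some (mins, maxes) =>
              (List.zipWith min mins (pvCnts rle), List.zipWith max maxes (pvCnts rle)))) d x))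
        PySem.Dict.empty rles := rfl
  rw [h2, h]
  rfl

theorem pvMerge_some (t : List (List (String × Int))) :
    ∀ (mi ma : List Int), pvMerge (some (mi, ma)) t =
      some (t.foldl (fun a r => List.zipWith min a (pvCnts r)) mi,
            t.foldl (fun a r => List.zipWith max a (pvCnts r)) ma) := by
  induction t with
  | nil => intro mi ma; rfl
  | cons r t ih => intro mi ma; simpa [pvMerge, pvMergeStep, List.foldl_cons] using ih _ _

theorem pvFoldZip_length (f : Int → Int → Int) (t : List (List (String × Int))) :
    ∀ (a : List Int), (∀ r ∈ t, (pvCnts r).length = a.length) →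
      (t.foldl (fun a r => List.zipWith f a (pvCnts r)) a).length = a.length := by
  induction t with
  | nil => intro a _; rfl
  | cons r t ih =>
    intro a h
    have hr : (pvCnts r).length = a.length := h r (by simp)
    have hl : (List.zipWith f a (pvCnts r)).length = a.length := by
      simp [List.length_zipWith, hr]
    rw [List.foldl_cons, ih _ (fun r' hr' => by rw [hl]; exact h r' (List.mem_cons_of_mem _ hr')), hl]

theorem pvFoldZip_getD (f : Int → Int → Int) (t : List (List (String × Int))) :
    ∀ (a : List Int), (∀ r ∈ t, (pvCnts r).length = a.length) → ∀ i, i < a.length →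
      (t.foldl (fun a r => List.zipWith f a (pvCnts r)) a).getD i 0 =
        (t.map (fun r => (pvCnts r).getD i 0)).foldl f (a.getD i 0) := by
  induction t with
  | nil => intro a _ i _; rfl
  | cons r t ih =>
    intro a h i hi
    have hr : (pvCnts r).length = a.length := h r (by simp)
    have hl : (List.zipWith f a (pvCnts r)).length = a.length := by
      simp [List.length_zipWith, hr]
    have hi' : i < (List.zipWith f a (pvCnts r)).length := by omega
    have hstep : (List.zipWith f a (pvCnts r)).getD i 0 = f (a.getD i 0) ((pvCnts r).getD i 0) := by
      rw [List.getD_eq_getElem _ _ hi', List.getD_eq_getElem _ _ hi,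
        List.getD_eq_getElem _ _ (by omega : i < (pvCnts r).length), List.getElem_zipWith]
    rw [List.foldl_cons, List.map_cons, List.foldl_cons,
      ih _ (fun r' hr' => by rw [hl]; exact h r' (List.mem_cons_of_mem _ hr')) i hi', hstep]

theorem pvEntry_eq (rles : List (List (String × Int))) (s : List Char)
    (hs : s ∈ rles.map pvSig) :
    pvEntryA (s, pvGrp rles s) = pvEntryB (s, ((pvMerge none (pvGrp rles s)).getD ([], []))) := by
  obtain ⟨r1, hr1, hsig1⟩ := List.mem_map.mp hs
  have hr1g : r1 ∈ pvGrp rles s := List.mem_filter.mpr ⟨hr1, by simp [hsig1]⟩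
  obtain ⟨r0, t, hg⟩ : ∃ r0 t, pvGrp rles s = r0 :: t := by
    cases hgg : pvGrp rles s with
    | nil => rw [hgg] at hr1g; simp at hr1g
    | cons a b => exact ⟨a, b, rfl⟩
  have hmem : ∀ r ∈ pvGrp rles s, pvSig r = s := by
    intro r hr
    simpa using (List.mem_filter.mp hr).2
  have hmem0 : pvSig r0 = s := hmem r0 (by rw [hg]; simp)
  have hmemt : ∀ r ∈ t, pvSig r = s := by
    intro r hr; exact hmem r (by rw [hg]; simp [hr])
  have hlen0 : (pvCnts r0).length = s.length := by rw [pvCnts_length, hmem0]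
  have hlent : ∀ r ∈ t, (pvCnts r).length = (pvCnts r0).length := by
    intro r hr; rw [pvCnts_length, hmemt r hr, hlen0]
  rw [hg]
  have hmerge : pvMerge none (r0 :: t) =
      some (t.foldl (fun a r => List.zipWith min a (pvCnts r)) (pvCnts r0),
            t.foldl (fun a r => List.zipWith max a (pvCnts r)) (pvCnts r0)) := by
    rw [pvMerge, List.foldl_cons]
    exact pvMerge_some t (pvCnts r0) (pvCnts r0)
  rw [hmerge]
  have hminlen : (t.foldl (fun a r => List.zipWith min a (pvCnts r)) (pvCnts r0)).length = s.length := by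
    rw [pvFoldZip_length min t (pvCnts r0) hlent, hlen0]
  have hmaxlen : (t.foldl (fun a r => List.zipWith max a (pvCnts r)) (pvCnts r0)).length = s.length := by
    rw [pvFoldZip_length max t (pvCnts r0) hlent, hlen0]
  have hcnts_getD : ∀ i : Nat, i < s.length → ∀ r ∈ r0 :: t, (pvCnts r).getD i 0 = pvCnt r (i : Int) := by
    intro i hi r hr
    exact pvCnts_getD r i (by rw [hmem r (by rw [hg]; exact hr)]; exact hi)
  have hmins : (PySem.List.pyRange 0 ((s.length : Int)) 1).map (fun i =>
        (PySem.List.min? ((r0 :: t).map (fun r => (PySem.List.pyGetD r i ("", 0)).2)) (fun x => x)).getD 0) =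
      t.foldl (fun a r => List.zipWith min a (pvCnts r)) (pvCnts r0) := by
    apply List.ext_getElem?
    intro i
    by_cases hi : i < s.length
    · rw [PySem.List.getElem?_map_pyRange_zero _ _ _ hi,
        List.getElem?_eq_getElem (by omega)]
      rw [← List.getD_eq_getElem _ 0 (by omega)]
      rw [pvFoldZip_getD min t (pvCnts r0) hlent i (by omega)]
      rw [List.map_cons, PySem.List.min?_id_cons, Option.getD_some]
      rw [List.map_congr_left (fun r hr => hcnts_getD i hi r (List.mem_cons_of_mem _ hr)),
        hcnts_getD i hi r0 (by simp)]
      rfl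
    · rw [List.getElem?_eq_none, List.getElem?_eq_none]
      · omega
      · simp [PySem.List.pyRange_zero_natCast]; omega
  have hmaxs : (PySem.List.pyRange 0 ((s.length : Int)) 1).map (fun i =>
        (PySem.List.max? ((r0 :: t).map (fun r => (PySem.List.pyGetD r i ("", 0)).2)) (fun x => x)).getD 0) =
      t.foldl (fun a r => List.zipWith max a (pvCnts r)) (pvCnts r0) := by
    apply List.ext_getElem?
    intro i
    by_cases hi : i < s.length
    · rw [PySem.List.getElem?_map_pyRange_zero _ _ _ hi,
        List.getElem?_eq_getElem (by omega)]
      rw [← List.getD_eq_getElem _ 0 (by omega)]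
      rw [pvFoldZip_getD max t (pvCnts r0) hlent i (by omega)]
      rw [List.map_cons, PySem.List.max?_id_cons, Option.getD_some]
      rw [List.map_congr_left (fun r hr => hcnts_getD i hi r (List.mem_cons_of_mem _ hr)),
        hcnts_getD i hi r0 (by simp)]
      rfl
    · rw [List.getElem?_eq_none, List.getElem?_eq_none]
      · omega
      · simp [PySem.List.pyRange_zero_natCast]; omega
  rw [pvEntryA, pvEntryB]
  simp only []
  rw [hmins, hmaxs]
  rfl

theorem pv_to_vrles_eq (rles : List (List (String × Int))) :
    to_vrles rles = to_vrles_alt rles := by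
  rw [pvA_explicit, pvB_explicit]
  congr 1
  rw [PySem.List.foldl_append_singleton_eq_map, List.nil_append]
  have hndA : (rles.foldl pvStepA PySem.Dict.empty).keys.Nodup := by
    rw [pvKeysA]; exact PySem.Set.nodup_ofList _
  have hndB : (rles.foldl pvStepB PySem.Dict.empty).keys.Nodup := by
    rw [pvKeysB]; exact PySem.Set.nodup_ofList _
  rw [PySem.Dict.items_eq_map_keys _ hndA [], PySem.Dict.items_eq_map_keys _ hndB ([], []),
    pvKeysA, pvKeysB, List.map_map, List.map_map]
  apply List.map_congr_left
  intro s hsK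
  have hs : s ∈ rles.map pvSig := (PySem.Set.mem_ofList _ _).mp hsK
  have hA : (rles.foldl pvStepA PySem.Dict.empty).getD s [] = pvGrp rles s := by
    rw [pvGetA]
    rfl
  have hB : (rles.foldl pvStepB PySem.Dict.empty).getD s ([], []) =
      (pvMerge none (pvGrp rles s)).getD ([], []) := by
    show ((rles.foldl pvStepB PySem.Dict.empty).get? s).getD ([], []) = _
    rw [pvGetB]
    rfl
  show pvEntryA (s, (rles.foldl pvStepA PySem.Dict.empty).getD s []) =
    pvEntryB (s, (rles.foldl pvStepB PySem.Dict.empty).getD s ([], []))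
  rw [hA, hB]
  exact pvEntry_eq rles s hs

-- ===== VERDICT (by name: the statement is the Claim_ definition above) =====
theorem to_vrles_spec : Claim_equal_to_vrles := by
  intro rles _ _
  show _ = _
  exact pv_to_vrles_eq rles
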